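/- GENERATED by tools/from_farm_form.py from farm/worked/heap_live_size/Proof.lean (a worked proof of the farm's unit `heap_live_size`,
   accepted by the verdict) — do not edit. -/
import ProgX.Base.Spec.Units.heap_live_size

open X86 X86.User Asan ProgX.Base

set_option maxRecDepth 4000
set_option maxHeartbeats 4000000

/-- `heap_live_size` (c/base/heap.c, static; 0x104200 in the base image, 28 instructions) satisfies `ProgX.Base.Spec.heap_live_size.spec`.
One walk: the four paths into the report routine are infeasible for the start of a live object (range, alignment, state word).
(Carried over from agent GA's proof against its test image, c/heap/heaptest.elf: tools/port_heap_units.py.) -/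
theorem ProgX.Base.Spec.Proved.heap_live_size_ok : ProgX.Base.Spec.heap_live_size.Statement := by
  intro Lay hLay μ hμ u₀ hcode H n u ret he hpre
  v_entry he
  obtain ⟨hok, hbase, c, hlive⟩ := hpre
  have hr := hok.obj_range hlive
  have hi := hok.obj_inside hlive
  have ha := hok.obj_aligned hlive
  obtain ⟨hsz, hst, _⟩ := hok.hdr _ hlive
  simp only at hr hi ha hsz hst
  have hcell := hok.cell
  rw [hbase] at hcell hr
  rw [ProgX.Spec.ofNat_toNat_sub _ 32 (by omega)] at hsz
  rw [ProgX.Spec.ofNat_toNat_sub _ 24 (by omega)] at hst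
  have hroom := hok.room
  have hhi := hok.hi
  rw [hbase] at hroom
  simp only [UInt64.reduceOfNat, HState.magic] at hsz hst hcell
  u_walk hcode [hμ.vendor] span [ProgX.Base.L.textLo, ProgX.Base.L.textHi] side (v_side)
  · -- 0x104224 taken: `p` is not a multiple of 16 — but the start of an object is
    exact absurd (by rw [ProgX.Spec.part8_and15]; exact ha) hbr_104224
  · -- the `ret`
    refine ReachVia.done ?_
    v_returned
    refine ⟨?_, w_mem⟩
    rw [w_rax, toNat_ofNat_lt' n (by omega)]
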